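-- pv_equiv track=rewrite | github.com/adp46710810-hash/PythonChatBot | bot_components/rpg_commands.py | _summarize_history
-- ===== SOURCE A (Python) =====
-- from typing import Any, Dict, List, Optional, Tuple
--
-- def _summarize_history(history: List[Dict[str, Any]]) -> Dict[str, int]:
--     auto_repeat_entries = [
--         entry for entry in history if max(1, int(entry.get("exploration_runs", 1))) > 1
--     ]
--     return {
--         "entry_count": len(history),
--         "total_runs": sum(max(1, int(entry.get("exploration_runs", 1))) for entry in history),
--         "total_battles": sum(max(0, int(entry.get("battle_count", 0))) for entry in history),
--         "total_exp": sum(max(0, int(entry.get("exp", 0))) for entry in history),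
--         "total_gold": sum(max(0, int(entry.get("gold", 0))) for entry in history),
--         "auto_repeat_entries": len(auto_repeat_entries),
--         "auto_repeat_runs": sum(
--             max(1, int(entry.get("exploration_runs", 1))) for entry in auto_repeat_entries
--         ),
--         "auto_repeat_battles": sum(
--             max(0, int(entry.get("battle_count", 0))) for entry in auto_repeat_entries
--         ),
--         "auto_repeat_exp": sum(max(0, int(entry.get("exp", 0))) for entry in auto_repeat_entries),
--         "auto_repeat_gold": sum(max(0, int(entry.get("gold", 0))) for entry in auto_repeat_entries),
--         "best_auto_repeat_runs": max(
--             [max(1, int(entry.get("exploration_runs", 1))) for entry in auto_repeat_entries],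
--             default=0,
--         ),
--     }
-- ===== SOURCE B (Python) =====
-- from typing import Any, Dict, List
--
--
-- def _summarize_history(history: List[Dict[str, Any]]) -> Dict[str, int]:
--     entry_count = 0
--     total_runs = total_battles = total_exp = total_gold = 0
--     ar_entries = ar_runs = ar_battles = ar_exp = ar_gold = 0
--     best = 0
--     for entry in history:
--         runs = max(1, int(entry.get("exploration_runs", 1)))
--         battles = max(0, int(entry.get("battle_count", 0)))
--         exp = max(0, int(entry.get("exp", 0)))
--         gold = max(0, int(entry.get("gold", 0)))
--         entry_count += 1
--         total_runs += runs
--         total_battles += battles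
--         total_exp += exp
--         total_gold += gold
--         if runs > 1:
--             ar_entries += 1
--             ar_runs += runs
--             ar_battles += battles
--             ar_exp += exp
--             ar_gold += gold
--             best = max(best, runs)
--     return {
--         "entry_count": entry_count,
--         "total_runs": total_runs,
--         "total_battles": total_battles,
--         "total_exp": total_exp,
--         "total_gold": total_gold,
--         "auto_repeat_entries": ar_entries,
--         "auto_repeat_runs": ar_runs,
--         "auto_repeat_battles": ar_battles,
--         "auto_repeat_exp": ar_exp,
--         "auto_repeat_gold": ar_gold,
--         "best_auto_repeat_runs": best,
--     }
-- ===== Notes on version B (the rewrite author's own statement) =====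
-- stated objective: simpler
-- what changed: Replaces A's eleven separate comprehension/generator passes (plus a materialized auto_repeat list) with one for-loop over history maintaining running accumulators and a running max.
import Mathlib
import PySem

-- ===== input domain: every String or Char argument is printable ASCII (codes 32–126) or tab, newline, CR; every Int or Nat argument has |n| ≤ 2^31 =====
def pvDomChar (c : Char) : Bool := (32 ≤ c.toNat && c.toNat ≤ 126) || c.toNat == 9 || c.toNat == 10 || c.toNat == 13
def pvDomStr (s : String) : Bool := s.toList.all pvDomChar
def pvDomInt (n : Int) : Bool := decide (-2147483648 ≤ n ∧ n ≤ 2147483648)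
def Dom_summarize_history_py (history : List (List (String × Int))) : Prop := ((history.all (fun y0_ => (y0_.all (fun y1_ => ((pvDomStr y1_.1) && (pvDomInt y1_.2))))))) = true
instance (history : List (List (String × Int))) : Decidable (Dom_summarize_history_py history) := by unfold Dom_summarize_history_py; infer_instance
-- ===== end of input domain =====

-- B replaces A's eleven comprehension/generator passes with one accumulator loop; objective: simpler (same O(n) cost).

-- ===== PORT A =====
-- entry.get(key, dflt): first-match lookup in the association list
def pvGetEntry (e : List (String × Int)) (k : String) (d : Int) : Int :=
  (PySem.Dict.mk e).getD k d

-- max(1, int(entry.get("exploration_runs", 1)))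
def pvRuns (e : List (String × Int)) : Int := max 1 (pvGetEntry e "exploration_runs" 1)
-- max(0, int(entry.get("battle_count", 0)))
def pvBattles (e : List (String × Int)) : Int := max 0 (pvGetEntry e "battle_count" 0)
-- max(0, int(entry.get("exp", 0)))
def pvExp (e : List (String × Int)) : Int := max 0 (pvGetEntry e "exp" 0)
-- max(0, int(entry.get("gold", 0)))
def pvGold (e : List (String × Int)) : Int := max 0 (pvGetEntry e "gold" 0)

def summarize_history_py (history : List (List (String × Int))) : List (String × Int) :=
  let auto_repeat_entries := history.filter (fun e => decide (1 < pvRuns e))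
  [("entry_count", (history.length : Int)),
   ("total_runs", (history.map pvRuns).sum),
   ("total_battles", (history.map pvBattles).sum),
   ("total_exp", (history.map pvExp).sum),
   ("total_gold", (history.map pvGold).sum),
   ("auto_repeat_entries", (auto_repeat_entries.length : Int)),
   ("auto_repeat_runs", (auto_repeat_entries.map pvRuns).sum),
   ("auto_repeat_battles", (auto_repeat_entries.map pvBattles).sum),
   ("auto_repeat_exp", (auto_repeat_entries.map pvExp).sum),
   ("auto_repeat_gold", (auto_repeat_entries.map pvGold).sum),
   -- max([...], default=0)
   ("best_auto_repeat_runs", (PySem.List.max? (auto_repeat_entries.map pvRuns) (fun x => x)).getD 0)]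

-- ===== PORT B =====
structure SummAcc where
  n : Int
  tr : Int
  tb : Int
  te : Int
  tg : Int
  ac : Int
  ar : Int
  ab : Int
  ae : Int
  ag : Int
  best : Int
deriving Repr, DecidableEq

def summStep (s : SummAcc) (e : List (String × Int)) : SummAcc :=
  let runs := pvRuns e
  let battles := pvBattles e
  let exp := pvExp e
  let gold := pvGold e
  let s := { s with n := s.n + 1, tr := s.tr + runs, tb := s.tb + battles,
                    te := s.te + exp, tg := s.tg + gold }
  if 1 < runs then
    { s with ac := s.ac + 1, ar := s.ar + runs, ab := s.ab + battles,
             ae := s.ae + exp, ag := s.ag + gold, best := max s.best runs }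
  else s

def summarize_history_py_alt (history : List (List (String × Int))) : List (String × Int) :=
  let s := history.foldl summStep ⟨0, 0, 0, 0, 0, 0, 0, 0, 0, 0, 0⟩
  [("entry_count", s.n),
   ("total_runs", s.tr),
   ("total_battles", s.tb),
   ("total_exp", s.te),
   ("total_gold", s.tg),
   ("auto_repeat_entries", s.ac),
   ("auto_repeat_runs", s.ar),
   ("auto_repeat_battles", s.ab),
   ("auto_repeat_exp", s.ae),
   ("auto_repeat_gold", s.ag),
   ("best_auto_repeat_runs", s.best)]

-- ===== PRECONDITION & SPEC =====
def Spec_summarize_history_py (history : List (List (String × Int))) (out : List (String × Int)) : Prop := out = summarize_history_py_alt history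
instance (history : List (List (String × Int))) (out : List (String × Int)) : Decidable (Spec_summarize_history_py history out) := by unfold Spec_summarize_history_py; infer_instance

-- ===== CLAIM (what is proved, stated in full; the proofs are below) =====
def Claim_equal_summarize_history_py : Prop := ∀ (history : List (List (String × Int))), Dom_summarize_history_py history → Spec_summarize_history_py history (summarize_history_py history)

-- ===== LEMMAS AND PROOFS =====

-- closed form of B's accumulator loop, in A's vocabulary
theorem summ_foldl_spec (l : List (List (String × Int))) (s : SummAcc) :
    l.foldl summStep s =
      let auto := l.filter (fun e => decide (1 < pvRuns e))
      ⟨s.n + l.length, s.tr + (l.map pvRuns).sum, s.tb + (l.map pvBattles).sum,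
       s.te + (l.map pvExp).sum, s.tg + (l.map pvGold).sum,
       s.ac + auto.length, s.ar + (auto.map pvRuns).sum, s.ab + (auto.map pvBattles).sum,
       s.ae + (auto.map pvExp).sum, s.ag + (auto.map pvGold).sum,
       auto.foldl (fun b e => max b (pvRuns e)) s.best⟩ := by
  induction l generalizing s with
  | nil => simp
  | cons x t ih =>
    simp only [List.foldl_cons, List.filter_cons]
    rw [ih]
    by_cases h : 1 < pvRuns x
    · simp [summStep, h]
      omega
    · simp [summStep, h]
      omega

theorem one_le_pvRuns (e : List (String × Int)) : 1 ≤ pvRuns e := le_max_left _ _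

-- running max from 0 equals Python's max(list, default=0) on the runs of the auto entries
theorem best_eq (auto : List (List (String × Int))) :
    auto.foldl (fun b e => max b (pvRuns e)) 0 =
      (PySem.List.max? (auto.map pvRuns) (fun x => x)).getD 0 := by
  cases auto with
  | nil => simp [PySem.List.max?]
  | cons x t =>
    rw [List.map_cons, PySem.List.max?_id_cons]
    simp only [List.foldl_cons, Option.getD_some]
    rw [← List.foldl_map]
    congr 1
    have := one_le_pvRuns x
    omega

-- ===== VERDICT (by name: the statement is the Claim_ definition above) =====
theorem summarize_history_py_spec : Claim_equal_summarize_history_py := by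
  intro history _
  unfold Spec_summarize_history_py summarize_history_py summarize_history_py_alt
  rw [summ_foldl_spec]
  simp [best_eq]
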